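-- pv_equiv track=rewrite | github.com/sueszli/vector-database-benchmark | dataset/python-mutated/fnt.py | ntt_convolute
-- ===== SOURCE A (Python) =====
-- def ntt(lst, dir):
--     if False:
--         i = 10
--         return i + 15
--     'Perform a transform on the elements of lst. len(lst) must\n       be 2**n or 3 * 2**n, where n <= 25. This is the slow DFT.'
--     p = 2113929217
--     d = len(lst)
--     d_prime = pow(d, p - 2, p)
--     xi = (p - 1) // d
--     w = 5
--     r = pow(w, xi, p)
--     r_prime = pow(w, p - 1 - xi, p)
--     if dir == 1:
--         a = lst
--         A = [0] * d
--         for i in range(d):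
--             s = 0
--             for j in range(d):
--                 s += a[j] * pow(r, i * j, p)
--             A[i] = s % p
--         return A
--     elif dir == -1:
--         A = lst
--         a = [0] * d
--         for j in range(d):
--             s = 0
--             for i in range(d):
--                 s += A[i] * pow(r_prime, i * j, p)
--             a[j] = d_prime * s % p
--         return a
--
-- def ntt_convolute(a, b):
--     if False:
--         while True:
--             i = 10
--     'convolute arrays a and b.'
--     assert len(a) == len(b)
--     x = ntt(a, 1)
--     y = ntt(b, 1)
--     for i in range(len(a)):
--         y[i] = y[i] * x[i]
--     r = ntt(y, -1)
--     return r
-- ===== SOURCE B (Python) =====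
-- def ntt_convolute(a, b):
--     """convolute arrays a and b."""
--     assert len(a) == len(b)
--     p = 2113929217
--     d = len(a)
--     xi = (p - 1) // d
--     r = pow(5, xi, p)
--     r_inv = pow(5, p - 1 - xi, p)
--     d_inv = pow(d, p - 2, p)
--     # forward transforms fused: evaluate both polynomials at r^i by Horner
--     # (running power ri instead of a modular pow in the inner loop), multiply on the fly
--     y = []
--     ri = 1
--     for _ in range(d):
--         xa = 0
--         xb = 0
--         for ca, cb in zip(reversed(a), reversed(b)):
--             xa = (xa * ri + ca) % p
--             xb = (xb * ri + cb) % p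
--         y.append(xa * xb % p)
--         ri = ri * r % p
--     # inverse transform: Horner at the running powers of r_inv, scaled by d_inv
--     out = []
--     rj = 1
--     for _ in range(d):
--         s = 0
--         for c in reversed(y):
--             s = (s * rj + c) % p
--         out.append(d_inv * s % p)
--         rj = rj * r_inv % p
--     return out
-- ===== Notes on version B (the rewrite author's own statement) =====
-- stated objective: faster
-- what changed: B fuses the two forward DFTs and the pointwise product into one pass and evaluates every DFT point by Horner's rule with a running power of the root, eliminating A's modular exponentiation (pow with exponent up to d^2) from the inner loops and reducing every intermediate mod p.
import Mathlib
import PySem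

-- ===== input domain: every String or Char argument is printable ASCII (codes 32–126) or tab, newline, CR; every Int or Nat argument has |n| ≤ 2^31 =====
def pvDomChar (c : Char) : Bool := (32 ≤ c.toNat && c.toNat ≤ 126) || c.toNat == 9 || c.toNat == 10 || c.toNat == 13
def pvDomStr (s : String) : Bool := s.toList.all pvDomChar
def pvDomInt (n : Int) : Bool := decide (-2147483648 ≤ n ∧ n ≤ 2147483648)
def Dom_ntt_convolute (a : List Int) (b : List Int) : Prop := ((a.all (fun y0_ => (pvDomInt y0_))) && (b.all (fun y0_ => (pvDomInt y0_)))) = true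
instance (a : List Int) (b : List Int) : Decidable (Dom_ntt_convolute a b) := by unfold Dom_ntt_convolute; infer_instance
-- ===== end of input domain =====

-- B fuses the two forward transforms and evaluates each DFT point by Horner's rule with a
-- running power of the root (no modular pow in the inner loop): O(d^2) big-int multiplications
-- instead of A's O(d^2) modular exponentiations — measurably faster, identical return values.

-- shared helper: Python's three-argument pow(b, e, m) for m > 0, by binary exponentiation
-- (exact on this domain: returns b^e mod m in [0, m), proved in fastPowMod_eq below)
def fastPowMod (b : Int) (e : Nat) (m : Int) : Int :=
  if e = 0 then PySem.Int.mod 1 m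
  else
    let h := fastPowMod b (e / 2) m
    if e % 2 = 0 then PySem.Int.mod (h * h) m
    else PySem.Int.mod (h * h * PySem.Int.mod b m) m
decreasing_by omega

-- ===== PORT A =====
-- port of the module helper `ntt(lst, dir)`; Python returns None for dir ∉ {1,-1},
-- which is unreachable here (ntt_convolute calls it only with 1 and -1): that branch is [].
def pyNtt (lst : List Int) (dir : Int) : List Int :=
  let p : Int := 2113929217
  let d : Nat := lst.length
  let d_prime : Int := fastPowMod (d : Int) (p - 2).toNat p
  let xi : Int := PySem.Int.floordiv (p - 1) (d : Int)
  let w : Int := 5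
  let r : Int := fastPowMod w xi.toNat p
  let r_prime : Int := fastPowMod w (p - 1 - xi).toNat p
  if dir = 1 then
    (List.range d).foldl
      (fun A i =>
        A.set i (PySem.Int.mod
          ((List.range d).foldl (fun s j => s + lst.getD j 0 * fastPowMod r (i * j) p) 0) p))
      (List.replicate d 0)
  else if dir = -1 then
    (List.range d).foldl
      (fun acc j =>
        acc.set j (PySem.Int.mod
          (d_prime * ((List.range d).foldl (fun s i => s + lst.getD i 0 * fastPowMod r_prime (i * j) p) 0)) p))
      (List.replicate d 0)
  else []

def ntt_convolute (a : List Int) (b : List Int) : List Int :=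
  -- `assert len(a) == len(b)` raises AssertionError outside Pre_
  let x := pyNtt a 1
  let y := pyNtt b 1
  let y2 := (List.range a.length).foldl (fun yy i => yy.set i (yy.getD i 0 * x.getD i 0)) y
  pyNtt y2 (-1)

-- ===== PORT B =====
def ntt_convolute_alt (a : List Int) (b : List Int) : List Int :=
  let p : Int := 2113929217
  let d : Nat := a.length
  let xi : Int := PySem.Int.floordiv (p - 1) (d : Int)
  let r : Int := fastPowMod 5 xi.toNat p
  let r_inv : Int := fastPowMod 5 (p - 1 - xi).toNat p
  let d_inv : Int := fastPowMod (d : Int) (p - 2).toNat p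
  -- forward transforms fused: Horner at the running powers ri of r, pointwise product on the fly
  let fwd := (List.range d).foldl
    (fun (st : List Int × Int) _ =>
      let ri := st.2
      let z := (a.reverse.zip b.reverse).foldl
        (fun (acc : Int × Int) cc =>
          (PySem.Int.mod (acc.1 * ri + cc.1) p, PySem.Int.mod (acc.2 * ri + cc.2) p)) (0, 0)
      (st.1 ++ [PySem.Int.mod (z.1 * z.2) p], PySem.Int.mod (ri * r) p))
    ([], 1)
  let y := fwd.1
  -- inverse transform: Horner at the running powers of r_inv, scaled by d_inv
  let inv := (List.range d).foldl
    (fun (st : List Int × Int) _ =>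
      let rj := st.2
      let s := y.reverse.foldl (fun acc c => PySem.Int.mod (acc * rj + c) p) 0
      (st.1 ++ [PySem.Int.mod (d_inv * s) p], PySem.Int.mod (rj * r_inv) p))
    ([], 1)
  inv.1

-- ===== PRECONDITION & SPEC =====
-- Pre_ excludes only inputs where A raises: unequal lengths (AssertionError)
-- and empty lists (ZeroDivisionError in (p-1)//d); B raises there too.
def Pre_ntt_convolute (a : List Int) (b : List Int) : Prop := a.length = b.length ∧ a ≠ []
instance (a : List Int) (b : List Int) : Decidable (Pre_ntt_convolute a b) := by unfold Pre_ntt_convolute; infer_instance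
def pvWitness_ntt_convolute : List Int × List Int := ([1, 2], [3, 4])
def Spec_ntt_convolute (a : List Int) (b : List Int) (out : List Int) : Prop := out = ntt_convolute_alt a b
instance (a : List Int) (b : List Int) (out : List Int) : Decidable (Spec_ntt_convolute a b out) := by unfold Spec_ntt_convolute; infer_instance

-- ===== CLAIM (what is proved, stated in full; the proofs are below) =====
def Claim_equal_ntt_convolute : Prop := ∀ (a : List Int) (b : List Int), Dom_ntt_convolute a b → Pre_ntt_convolute a b → Spec_ntt_convolute a b (ntt_convolute a b)

-- ===== LEMMAS AND PROOFS =====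

-- the plain polynomial value Σ_j c_j * x^j (proof vocabulary only)
def polyE (c : List Int) (x : Int) : Int :=
  ((List.range c.length).map (fun j => c.getD j 0 * x ^ j)).sum

lemma fastPowMod_eq (b : Int) (e : Nat) (m : Int) (hm : 0 < m) :
    fastPowMod b e m = b ^ e % m := by
  induction e using Nat.strong_induction_on with
  | _ e ih =>
    rw [fastPowMod]
    by_cases h0 : e = 0
    · simp [h0, PySem.Int.mod_eq_emod_of_pos hm]
    · rw [if_neg h0]
      have ihh := ih (e / 2) (by omega)
      simp only [PySem.Int.mod_eq_emod_of_pos hm, ihh]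
      have hx : Int.ModEq m (b ^ (e / 2) % m) (b ^ (e / 2)) := Int.emod_emod_of_dvd _ dvd_rfl
      have hb : Int.ModEq m (b % m) b := Int.emod_emod_of_dvd _ dvd_rfl
      by_cases he : e % 2 = 0
      · rw [if_pos he]
        have hpow : b ^ (e / 2) * b ^ (e / 2) = b ^ e := by
          rw [← pow_add]; congr 1; omega
        exact hpow ▸ (hx.mul hx)
      · rw [if_neg he]
        have hpow : b ^ (e / 2) * b ^ (e / 2) * b = b ^ e := by
          rw [← pow_add, ← pow_succ]; congr 1; omega
        exact hpow ▸ ((hx.mul hx).mul hb)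

lemma sum_map_mod_congr (p : Int) (l : List Nat) (f g : Nat → Int)
    (h : ∀ j ∈ l, f j % p = g j % p) :
    (l.map f).sum % p = (l.map g).sum % p := by
  induction l with
  | nil => rfl
  | cons a t ih =>
    have h1 : Int.ModEq p (f a) (g a) := h a (List.mem_cons_self)
    have h2 : Int.ModEq p ((t.map f).sum) ((t.map g).sum) :=
      ih (fun j hj => h j (List.mem_cons_of_mem _ hj))
    simpa using h1.add h2

lemma polyE_cons (h : Int) (t : List Int) (x : Int) :
    polyE (h :: t) x = h + x * polyE t x := by
  unfold polyE
  rw [show (h :: t).length = t.length + 1 from rfl, List.range_succ_eq_map]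
  simp only [List.map_cons, List.map_map, List.sum_cons]
  have : (List.map ((fun j => (h :: t).getD j 0 * x ^ j) ∘ Nat.succ) (List.range t.length)).sum
      = (List.map (fun j => x * (t.getD j 0 * x ^ j)) (List.range t.length)).sum := by
    refine congrArg List.sum (List.map_congr_left ?_)
    intro j _
    simp [Function.comp, pow_succ]
    ring
  rw [this, List.sum_map_mul_left]
  simp

lemma horner_eq (p : Int) (hp : 0 < p) (c : List Int) (x : Int) :
    c.reverse.foldl (fun acc t => PySem.Int.mod (acc * x + t) p) 0 = polyE c x % p := by
  rw [List.foldl_reverse]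
  induction c with
  | nil => simp [polyE]
  | cons h t ih =>
    simp only [PySem.Int.mod_eq_emod_of_pos hp] at ih ⊢
    simp only [List.foldr_cons]
    rw [ih, polyE_cons]
    have h1 : Int.ModEq p (polyE t x % p) (polyE t x) := Int.emod_emod_of_dvd _ dvd_rfl
    have : Int.ModEq p (polyE t x % p * x + h) (h + x * polyE t x) := by
      have := (h1.mul_right x).add_right h
      calc (polyE t x % p * x + h) ≡ polyE t x * x + h [ZMOD p] := this
        _ = h + x * polyE t x := by ring
    exact this

-- evaluation point may be reduced mod p without changing the value mod p
lemma polyE_point_congr (p : Int) (c : List Int) (x x' : Int) (hx : x % p = x' % p) :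
    polyE c x % p = polyE c x' % p := by
  unfold polyE
  refine sum_map_mod_congr p _ _ _ ?_
  intro j _
  exact (Int.ModEq.refl (c.getD j 0)).mul ((show Int.ModEq p x x' from hx).pow j)

-- entrywise mod-congruent coefficient lists give mod-congruent values
lemma polyE_list_congr (p : Int) (u v : List Int) (x : Int)
    (hlen : u.length = v.length) (h : ∀ j, u.getD j 0 % p = v.getD j 0 % p) :
    polyE u x % p = polyE v x % p := by
  unfold polyE
  rw [hlen]
  refine sum_map_mod_congr p _ _ _ ?_
  intro j _
  exact (show Int.ModEq p (u.getD j 0) (v.getD j 0) from h j).mul (Int.ModEq.refl (x ^ j))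

-- A's inner power-sum row, reduced, is the polynomial value at w^k
lemma arow (p : Int) (hp : 0 < p) (w : Int) (k : Nat) (c : List Int) :
    ((List.range c.length).foldl (fun s j => s + c.getD j 0 * fastPowMod w (k * j) p) 0) % p
      = polyE c (w ^ k) % p := by
  rw [PySem.List.foldl_add (List.range c.length)
        (fun j => c.getD j 0 * fastPowMod w (k * j) p) 0, zero_add]
  unfold polyE
  refine sum_map_mod_congr p _ _ _ ?_
  intro j _
  rw [fastPowMod_eq _ _ _ hp]
  have h1 : Int.ModEq p (w ^ (k * j) % p) ((w ^ k) ^ j) := by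
    have : w ^ (k * j) = (w ^ k) ^ j := pow_mul w k j
    calc (w ^ (k * j) % p) ≡ w ^ (k * j) [ZMOD p] := Int.emod_emod_of_dvd _ dvd_rfl
      _ = (w ^ k) ^ j := this
  exact (Int.ModEq.refl (c.getD j 0)).mul h1

-- B's outer accumulation loop: appends F of the running power, in order
lemma fwd_loop (p : Int) (hp : 1 < p) (r : Int) (F : Int → Int) (n : Nat) :
    (List.range n).foldl
        (fun (st : List Int × Int) _ => (st.1 ++ [F st.2], PySem.Int.mod (st.2 * r) p)) ([], 1)
      = ((List.range n).map (fun i => F (r ^ i % p)), r ^ n % p) := by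
  induction n with
  | zero => simp [Int.emod_eq_of_lt, hp]
  | succ n ih =>
    rw [List.range_succ, List.foldl_append, ih, List.map_append]
    have hp0 : (0 : Int) < p := by omega
    simp only [List.foldl_cons, List.foldl_nil, List.map_cons, List.map_nil, Prod.mk.injEq]
    refine ⟨trivial, ?_⟩
    rw [PySem.Int.mod_eq_emod_of_pos hp0, Int.mul_emod, Int.emod_emod_of_dvd _ dvd_rfl,
      ← Int.mul_emod, ← pow_succ]

-- A's index-assignment loop over range n fills the first n slots from the ORIGINAL list
lemma set_loop (g : Nat → Int → Int) :
    ∀ (n : Nat) (y : List Int), n ≤ y.length →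
      (List.range n).foldl (fun l i => l.set i (g i (l.getD i 0))) y
        = (List.range n).map (fun i => g i (y.getD i 0)) ++ y.drop n := by
  intro n
  induction n with
  | zero => simp
  | succ n ih =>
    intro y hn
    rw [List.range_succ, List.foldl_append, ih y (by omega), List.map_append]
    simp only [List.foldl_cons, List.foldl_nil]
    have hlen : (List.map (fun i => g i (y.getD i 0)) (List.range n)).length = n := by simp
    have hnlt : n < y.length := by omega
    have hget : ((List.map (fun i => g i (y.getD i 0)) (List.range n)) ++ y.drop n).getD n 0
        = y.getD n 0 := by
      rw [List.getD_append_right _ _ _ n (by omega), hlen, Nat.sub_self]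
      rw [List.getD_eq_getElem?_getD, List.getD_eq_getElem?_getD, List.getElem?_drop, Nat.add_zero]
    rw [hget, List.set_append]
    rw [if_neg (by omega), hlen, Nat.sub_self]
    rw [List.drop_eq_getElem_cons hnlt, List.set_cons_zero]
    simp [List.append_assoc]

-- the paired Horner fold over a zip splits into two independent Horner folds
lemma zip_fold_split (p ri : Int) :
    ∀ (u v : List Int) (s t : Int), u.length = v.length →
      (u.zip v).foldl
          (fun (acc : Int × Int) cc =>
            (PySem.Int.mod (acc.1 * ri + cc.1) p, PySem.Int.mod (acc.2 * ri + cc.2) p)) (s, t)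
        = (u.foldl (fun a c => PySem.Int.mod (a * ri + c) p) s,
           v.foldl (fun a c => PySem.Int.mod (a * ri + c) p) t) := by
  intro u
  induction u with
  | nil => intro v s t h; cases v <;> simp_all
  | cons hu tu ih =>
    intro v s t h
    cases v with
    | nil => simp at h
    | cons hv tv =>
      simp only [List.zip_cons_cons, List.foldl_cons]
      exact ih tv _ _ (by simpa using h)

-- the forward row values of A and B coincide exactly
lemma row_eq (p : Int) (hp : 0 < p) (w : Int) (k : Nat) (c : List Int) :
    c.reverse.foldl (fun acc t => PySem.Int.mod (acc * (w ^ k % p) + t) p) 0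
      = PySem.Int.mod
          ((List.range c.length).foldl (fun s j => s + c.getD j 0 * fastPowMod w (k * j) p) 0) p := by
  rw [horner_eq p hp, PySem.Int.mod_eq_emod_of_pos hp, arow p hp,
    polyE_point_congr p c (w ^ k % p) (w ^ k) (Int.emod_emod_of_dvd _ dvd_rfl)]

-- proof vocabulary: the constants both ports compute, and the row values of each side
def pvR (d : Nat) : Int :=
  fastPowMod 5 (PySem.Int.floordiv (2113929217 - 1) (d : Int)).toNat 2113929217
def pvRinv (d : Nat) : Int :=
  fastPowMod 5 (2113929217 - 1 - PySem.Int.floordiv (2113929217 - 1) (d : Int)).toNat 2113929217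
def pvDinv (d : Nat) : Int :=
  fastPowMod (d : Int) ((2113929217 : Int) - 2).toNat 2113929217
def pvFa (c : List Int) (i : Nat) : Int :=
  PySem.Int.mod ((List.range c.length).foldl
    (fun s j => s + c.getD j 0 * fastPowMod (pvR c.length) (i * j) 2113929217) 0) 2113929217
def pvFinv (y : List Int) (j : Nat) : Int :=
  PySem.Int.mod (pvDinv y.length * ((List.range y.length).foldl
    (fun s i => s + y.getD i 0 * fastPowMod (pvRinv y.length) (i * j) 2113929217) 0)) 2113929217
def pvHorner (c : List Int) (x : Int) : Int :=
  c.reverse.foldl (fun acc t => PySem.Int.mod (acc * x + t) 2113929217) 0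
def pvYB (a b : List Int) : List Int :=
  (List.range a.length).map (fun i =>
    PySem.Int.mod (pvHorner a (pvR a.length ^ i % 2113929217)
      * pvHorner b (pvR a.length ^ i % 2113929217)) 2113929217)

lemma pyNtt_fwd (c : List Int) : pyNtt c 1 = (List.range c.length).map (pvFa c) := by
  have h := set_loop (fun i _ =>
      PySem.Int.mod ((List.range c.length).foldl
        (fun s j => s + c.getD j 0 * fastPowMod (pvR c.length) (i * j) 2113929217) 0) 2113929217)
    c.length (List.replicate c.length 0) (by simp)
  simp only [] at h
  unfold pyNtt
  simp only [pvR] at h ⊢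
  rw [if_pos trivial, h]
  simp [pvFa, pvR]

lemma pyNtt_inv (y : List Int) : pyNtt y (-1) = (List.range y.length).map (pvFinv y) := by
  have h := set_loop (fun j _ =>
      PySem.Int.mod (pvDinv y.length * ((List.range y.length).foldl
        (fun s i => s + y.getD i 0 * fastPowMod (pvRinv y.length) (i * j) 2113929217) 0)) 2113929217)
    y.length (List.replicate y.length 0) (by simp)
  simp only [] at h
  unfold pyNtt
  simp only [pvRinv, pvDinv] at h ⊢
  rw [if_neg (by decide), if_pos trivial, h]
  simp [pvFinv, pvRinv, pvDinv]

lemma alt_eq (a b : List Int) (h : a.length = b.length) :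
    ntt_convolute_alt a b = (List.range a.length).map (fun j =>
      PySem.Int.mod (pvDinv a.length
        * pvHorner (pvYB a b) (pvRinv a.length ^ j % 2113929217)) 2113929217) := by
  have hp1 : (1 : Int) < 2113929217 := by norm_num
  unfold ntt_convolute_alt
  simp only [pvDinv, pvRinv, pvR, pvHorner, pvYB]
  rw [fwd_loop _ hp1 _ (fun ri =>
    PySem.Int.mod
      (((a.reverse.zip b.reverse).foldl
          (fun (acc : Int × Int) cc =>
            (PySem.Int.mod (acc.1 * ri + cc.1) 2113929217,
             PySem.Int.mod (acc.2 * ri + cc.2) 2113929217)) (0, 0)).1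
        * ((a.reverse.zip b.reverse).foldl
          (fun (acc : Int × Int) cc =>
            (PySem.Int.mod (acc.1 * ri + cc.1) 2113929217,
             PySem.Int.mod (acc.2 * ri + cc.2) 2113929217)) (0, 0)).2) 2113929217) a.length]
  rw [fwd_loop _ hp1 _ (fun rj =>
    PySem.Int.mod ((fastPowMod ((a.length : Nat) : Int) ((2113929217 : Int) - 2).toNat 2113929217)
      * ((List.range a.length).map (fun i =>
          PySem.Int.mod
            (((a.reverse.zip b.reverse).foldl
                (fun (acc : Int × Int) cc =>
                  (PySem.Int.mod (acc.1 * (fastPowMod 5 (PySem.Int.floordiv (2113929217 - 1) (a.length : Int)).toNat 2113929217 ^ i % 2113929217) + cc.1) 2113929217,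
                   PySem.Int.mod (acc.2 * (fastPowMod 5 (PySem.Int.floordiv (2113929217 - 1) (a.length : Int)).toNat 2113929217 ^ i % 2113929217) + cc.2) 2113929217)) (0, 0)).1
              * ((a.reverse.zip b.reverse).foldl
                (fun (acc : Int × Int) cc =>
                  (PySem.Int.mod (acc.1 * (fastPowMod 5 (PySem.Int.floordiv (2113929217 - 1) (a.length : Int)).toNat 2113929217 ^ i % 2113929217) + cc.1) 2113929217,
                   PySem.Int.mod (acc.2 * (fastPowMod 5 (PySem.Int.floordiv (2113929217 - 1) (a.length : Int)).toNat 2113929217 ^ i % 2113929217) + cc.2) 2113929217)) (0, 0)).2) 2113929217)).reverse.foldl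
          (fun acc c => PySem.Int.mod (acc * rj + c) 2113929217) 0) 2113929217) a.length]
  refine List.map_congr_left ?_
  intro j _
  congr 1
  congr 1
  refine congrArg _ (congrArg _ (List.map_congr_left ?_))
  intro i _
  rw [zip_fold_split 2113929217 (fastPowMod 5 (PySem.Int.floordiv (2113929217 - 1) (a.length : Int)).toNat 2113929217 ^ i % 2113929217) a.reverse b.reverse 0 0 (by simp [h])]

-- A's pointwise-product list, written with the forward row values
def pvY2 (a b : List Int) : List Int :=
  (List.range a.length).map (fun i => pvFa b i * pvFa a i)

lemma entry_congr (a b : List Int) (hlen : a.length = b.length) (n : Nat) :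
    (pvY2 a b).getD n 0 % 2113929217 = (pvYB a b).getD n 0 % 2113929217 := by
  have hp : (0 : Int) < 2113929217 := by norm_num
  by_cases hn : n < a.length
  · unfold pvY2 pvYB
    rw [PySem.List.getD_map_range _ _ _ _ hn, PySem.List.getD_map_range _ _ _ _ hn]
    have hA : pvHorner a (pvR a.length ^ n % 2113929217) = pvFa a n := by
      unfold pvHorner pvFa
      exact row_eq _ hp _ n a
    have hB : pvHorner b (pvR a.length ^ n % 2113929217) = pvFa b n := by
      have hr : pvR a.length = pvR b.length := by rw [hlen]
      rw [hr]
      unfold pvHorner pvFa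
      exact row_eq _ hp _ n b
    rw [hA, hB, PySem.Int.mod_eq_emod_of_pos hp, Int.emod_emod_of_dvd _ dvd_rfl, mul_comm]
  · rw [List.getD_eq_default _ _ (by simp [pvY2]; omega), List.getD_eq_default _ _ (by simp [pvYB]; omega)]

lemma final_row (a b : List Int) (hlen : a.length = b.length) (j : Nat) :
    pvFinv (pvY2 a b) j
      = PySem.Int.mod (pvDinv a.length
          * pvHorner (pvYB a b) (pvRinv a.length ^ j % 2113929217)) 2113929217 := by
  have hp : (0 : Int) < 2113929217 := by norm_num
  have hY2len : (pvY2 a b).length = a.length := by simp [pvY2]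
  unfold pvFinv
  rw [hY2len]
  set w := pvRinv a.length with hw
  set D := pvDinv a.length with hD
  set S := (List.range a.length).foldl
    (fun s i => s + (pvY2 a b).getD i 0 * fastPowMod w (i * j) 2113929217) 0 with hSdef
  set H := pvHorner (pvYB a b) (w ^ j % 2113929217) with hHdef
  have hH : H = polyE (pvYB a b) (w ^ j) % 2113929217 := by
    rw [hHdef]
    unfold pvHorner
    rw [horner_eq _ hp]
    exact polyE_point_congr _ _ _ _ (Int.emod_emod_of_dvd _ dvd_rfl)
  have harow : S % 2113929217 = polyE (pvY2 a b) (w ^ j) % 2113929217 := by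
    rw [hSdef]
    have hfun : (fun (s : Int) i => s + (pvY2 a b).getD i 0 * fastPowMod w (i * j) 2113929217)
        = (fun (s : Int) i => s + (pvY2 a b).getD i 0 * fastPowMod w (j * i) 2113929217) := by
      funext s i; rw [Nat.mul_comm]
    rw [hfun, ← hY2len]
    exact arow 2113929217 hp w j (pvY2 a b)
  have hlist : polyE (pvY2 a b) (w ^ j) % 2113929217 = polyE (pvYB a b) (w ^ j) % 2113929217 :=
    polyE_list_congr _ _ _ _ (by simp [pvY2, pvYB]) (entry_congr a b hlen)
  have hsh : S % 2113929217 = H := by rw [harow, hlist, ← hH]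
  have hHH : H % 2113929217 = H := by
    rw [hH]; exact Int.emod_emod_of_dvd _ dvd_rfl
  rw [PySem.Int.mod_eq_emod_of_pos hp, PySem.Int.mod_eq_emod_of_pos hp,
    Int.mul_emod D S, hsh, Int.mul_emod D H, hHH]

-- ===== VERDICT (by name: the statement is the Claim_ definition above) =====
theorem ntt_convolute_spec : Claim_equal_ntt_convolute := by
  intro a b _ hpre
  obtain ⟨hlen, hne⟩ := hpre
  unfold Spec_ntt_convolute
  rw [alt_eq a b hlen]
  unfold ntt_convolute
  simp only [pyNtt_fwd a, pyNtt_fwd b]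
  have h2 := set_loop (fun i v => v * ((List.range a.length).map (pvFa a)).getD i 0)
    a.length ((List.range b.length).map (pvFa b)) (by simp [hlen])
  simp only [] at h2
  rw [h2, List.drop_eq_nil_of_le (by simp [hlen]), List.append_nil]
  have hmap : (List.range a.length).map
        (fun i => (((List.range b.length).map (pvFa b)).getD i 0)
          * (((List.range a.length).map (pvFa a)).getD i 0))
      = pvY2 a b := by
    refine List.map_congr_left ?_
    intro i hi
    have hia : i < a.length := List.mem_range.mp hi
    rw [PySem.List.getD_map_range _ _ _ _ hia, PySem.List.getD_map_range _ _ _ _ (hlen ▸ hia)]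
  rw [hmap, pyNtt_inv (pvY2 a b)]
  have hY2len : (pvY2 a b).length = a.length := by simp [pvY2]
  rw [hY2len]
  refine List.map_congr_left ?_
  intro j _
  exact final_row a b hlen j
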